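-- pv_equiv track=rewrite | github.com/TennyResearch/ServerlessVideoChat | Lecture_40/canary/aws/route_send_offer/lambda_handler.py | remove_duplicates_by_email
-- ===== SOURCE A (Python) =====
-- def remove_duplicates_by_email(connections):
--     sorted_by_email = sorted(connections, key=lambda c: c.get('email'))
--     unique_objects = {}
--     for obj in sorted_by_email:
--         email = obj.get('email')
--         timestamp = obj.get('connectedAtUTC')
--         if email:
--             if email not in unique_objects or unique_objects[email]['connectedAtUTC'] < timestamp:
--                 unique_objects[email] = obj
--     return list(unique_objects.values())
-- ===== SOURCE B (Python) =====
-- def remove_duplicates_by_email(connections):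
--     result = []
--     cur_email = None
--     group = []
--     for c in sorted(connections, key=lambda c: c.get('email')):
--         email = c.get('email')
--         if group and email != cur_email:
--             if cur_email:
--                 result.append(max(group, key=lambda g: g.get('connectedAtUTC')))
--             group = []
--         cur_email = email
--         group.append(c)
--     if group and cur_email:
--         result.append(max(group, key=lambda g: g.get('connectedAtUTC')))
--     return result
-- ===== Notes on version B (the rewrite author's own statement) =====
-- stated objective: alternative
-- what changed: B replaces A's dict of running per-email maxima with a group-and-reduce pass: after the same sort it scans each adjacent equal-email block once and appends max(block, key=timestamp) for truthy emails, so no dict is built at all.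
import Mathlib
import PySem

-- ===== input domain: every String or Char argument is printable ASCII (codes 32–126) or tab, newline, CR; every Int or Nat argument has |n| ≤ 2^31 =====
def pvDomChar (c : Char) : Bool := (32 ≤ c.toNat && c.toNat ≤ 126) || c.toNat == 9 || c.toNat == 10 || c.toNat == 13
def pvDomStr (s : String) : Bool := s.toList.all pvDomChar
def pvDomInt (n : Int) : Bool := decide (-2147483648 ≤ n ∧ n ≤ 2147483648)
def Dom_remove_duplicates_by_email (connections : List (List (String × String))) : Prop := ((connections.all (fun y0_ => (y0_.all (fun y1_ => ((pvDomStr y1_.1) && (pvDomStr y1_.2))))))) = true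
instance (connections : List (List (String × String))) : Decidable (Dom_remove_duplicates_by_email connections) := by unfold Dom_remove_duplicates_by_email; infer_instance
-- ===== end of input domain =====

-- B replaces A's dict of running per-email maxima with a single groupby-style pass over the
-- same sorted list, emitting max(group, key=timestamp) at each truthy-email group boundary.


-- ===== PORT A =====
-- c.get('email') / c.get('connectedAtUTC'): first-match lookup in the connection's assoc list.
def pvEmail (c : List (String × String)) : Option String := c.lookup "email"
-- String views of the two fields, exact wherever A's Python does not raise (Pre_ below):
-- a missing key becomes "" there only in positions Python never compares (a lone connection,
-- a falsy email, an unduplicated email), where "" behaves identically (falsy / unsorted alone).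
def pvEmailS (c : List (String × String)) : String := (c.lookup "email").getD ""
def pvTsS (c : List (String × String)) : String := (c.lookup "connectedAtUTC").getD ""

-- the body of A's for-loop over sorted_by_email, folding the dict unique_objects
def pvStepA (d : PySem.Dict String (List (String × String))) (obj : List (String × String)) :
    PySem.Dict String (List (String × String)) :=
  let email := pvEmailS obj
  if email ≠ "" then
    if d.contains email = false ∨ pvTsS (d.getD email []) < pvTsS obj then d.insert email obj
    else d
  else d

def remove_duplicates_by_email (connections : List (List (String × String))) : List (List (String × String)) :=
  let sorted_by_email := PySem.List.sorted connections pvEmailS false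
  ((sorted_by_email.foldl pvStepA PySem.Dict.empty).values)

-- ===== PORT B =====
-- truthiness of cur_email (an Optional[str]): some nonempty string
def pvTruthy (e : Option String) : Bool :=
  match e with
  | none => false
  | some s => s != ""

-- the body of B's for-loop; state = (result, cur_email, group)
def pvStepB (st : List (List (String × String)) × Option String × List (List (String × String)))
    (c : List (String × String)) :
    List (List (String × String)) × Option String × List (List (String × String)) :=
  let (result, cur, grp) := st
  let email := pvEmail c
  if grp ≠ [] ∧ email ≠ cur then
    ((if pvTruthy cur then result ++ (PySem.List.max? grp pvTsS).toList else result), email, [c])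
  else (result, email, grp ++ [c])

def remove_duplicates_by_email_alt (connections : List (List (String × String))) : List (List (String × String)) :=
  let st := (PySem.List.sorted connections pvEmailS false).foldl pvStepB ([], none, [])
  if st.2.2 ≠ [] ∧ pvTruthy st.2.1 then st.1 ++ (PySem.List.max? st.2.2 pvTsS).toList else st.1

-- ===== PRECONDITION & SPEC =====
-- Pre_ excludes exactly the inputs on which the Python A raises: with two or more connections a
-- missing 'email' key makes sorted() compare None with a string or None (TypeError), and a
-- duplicated truthy email whose group contains a connection without 'connectedAtUTC' makes A's
-- timestamp comparison raise (KeyError/TypeError).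
def Pre_remove_duplicates_by_email (connections : List (List (String × String))) : Prop :=
  (connections.length ≤ 1 ∨ ∀ c ∈ connections, (c.lookup "email").isSome) ∧
  (∀ c ∈ connections, pvEmailS c ≠ "" →
     2 ≤ connections.countP (fun c' => pvEmailS c' = pvEmailS c) →
     (c.lookup "connectedAtUTC").isSome)
instance (connections : List (List (String × String))) : Decidable (Pre_remove_duplicates_by_email connections) := by
  unfold Pre_remove_duplicates_by_email; infer_instance

def pvWitness_remove_duplicates_by_email : (List (List (String × String))) :=
  [[("email", "a"), ("connectedAtUTC", "1")], [("email", "b")], [("email", "a"), ("connectedAtUTC", "2")]]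

def Spec_remove_duplicates_by_email (connections : List (List (String × String))) (out : List (List (String × String))) : Prop := out = remove_duplicates_by_email_alt connections
instance (connections : List (List (String × String))) (out : List (List (String × String))) : Decidable (Spec_remove_duplicates_by_email connections out) := by unfold Spec_remove_duplicates_by_email; infer_instance

-- ===== CLAIM (what is proved, stated in full; the proofs are below) =====
def Claim_equal_remove_duplicates_by_email : Prop := ∀ (connections : List (List (String × String))), Dom_remove_duplicates_by_email connections → Pre_remove_duplicates_by_email connections → Spec_remove_duplicates_by_email connections (remove_duplicates_by_email connections)

-- ===== LEMMAS AND PROOFS =====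

-- emit of one finished group
def pvEmit (cur : Option String) (grp : List (List (String × String))) : List (List (String × String)) :=
  if pvTruthy cur then (PySem.List.max? grp pvTsS).toList else []

-- recursive description of B's state machine: current email cur, current (nonempty) group grp
def pvGk (cur : Option String) (grp : List (List (String × String))) :
    List (List (String × String)) → List (List (String × String))
  | [] => pvEmit cur grp
  | x :: xs =>
    if pvEmail x = cur then pvGk cur (grp ++ [x]) xs
    else pvEmit cur grp ++ pvGk (pvEmail x) [x] xs

def pvG : List (List (String × String)) → List (List (String × String))
  | [] => []
  | c :: rest => pvGk (pvEmail c) [c] rest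

-- running first-max by timestamp (what A's replace-if-strictly-later loop computes per group)
def pvBest (b : List (String × String)) (g : List (List (String × String))) : List (String × String) :=
  g.foldl (fun m y => if pvTsS m < pvTsS y then y else m) b

theorem pvMax?_cons (g : List (List (String × String))) :
    ∀ c, PySem.List.max? (c :: g) pvTsS = some (pvBest c g) := by
  induction g with
  | nil => intro c; rfl
  | cons x xs ih =>
    intro c
    have hx := ih x
    have hc := ih c
    unfold PySem.List.max? pvBest at *
    simp only [List.foldl_cons] at *
    by_cases h : pvTsS c < pvTsS x
    · simp only [if_pos h]
      exact hx
    · simp only [if_neg h]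
      exact hc

theorem pvGk_eq (l : List (List (String × String))) :
    ∀ (cur : Option String) (grp : List (List (String × String))),
    pvGk cur grp l = pvEmit cur (grp ++ l.takeWhile (fun x => pvEmail x == cur))
      ++ pvG (l.dropWhile (fun x => pvEmail x == cur)) := by
  induction l with
  | nil => intro cur grp; simp [pvGk, pvG]
  | cons x xs ih =>
    intro cur grp
    by_cases h : pvEmail x = cur
    · simp [pvGk, h, List.takeWhile_cons, List.dropWhile_cons, ih cur (grp ++ [x])]
    · have hb : (pvEmail x == cur) = false := by simp [h]
      simp [pvGk, h, List.takeWhile_cons, List.dropWhile_cons, hb, pvG]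

-- B's fold equals the recursive machine
theorem pvFoldB (l : List (List (String × String))) :
    ∀ (result : List (List (String × String))) (cur : Option String)
      (grp : List (List (String × String))), grp ≠ [] →
    (let st := l.foldl pvStepB (result, cur, grp)
     if st.2.2 ≠ [] ∧ pvTruthy st.2.1 then st.1 ++ (PySem.List.max? st.2.2 pvTsS).toList else st.1)
      = result ++ pvGk cur grp l := by
  induction l with
  | nil =>
    intro result cur grp hne
    by_cases h : pvTruthy cur = true <;> simp [pvGk, pvEmit, hne, h]
  | cons x xs ih =>
    intro result cur grp hne
    by_cases h : pvEmail x = cur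
    · have : pvStepB (result, cur, grp) x = (result, cur, grp ++ [x]) := by
        simp [pvStepB, h, hne]
      simp only [List.foldl_cons, this]
      rw [ih result cur (grp ++ [x]) (by simp)]
      simp [pvGk, h]
    · have : pvStepB (result, cur, grp) x
          = ((if pvTruthy cur then result ++ (PySem.List.max? grp pvTsS).toList else result), pvEmail x, [x]) := by
        simp [pvStepB, h, hne]
      simp only [List.foldl_cons, this]
      rw [ih _ (pvEmail x) [x] (by simp)]
      by_cases ht : pvTruthy cur = true <;> simp [pvGk, pvEmit, h, ht]

theorem pvB_eq_G (s : List (List (String × String))) :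
    (let st := s.foldl pvStepB ([], none, [])
     if st.2.2 ≠ [] ∧ pvTruthy st.2.1 then st.1 ++ (PySem.List.max? st.2.2 pvTsS).toList else st.1)
      = pvG s := by
  cases s with
  | nil => simp [pvG]
  | cons c rest =>
    have h0 : pvStepB ([], none, []) c = ([], pvEmail c, [c]) := by simp [pvStepB]
    simp only [List.foldl_cons, h0]
    rw [pvFoldB rest [] (pvEmail c) [c] (by simp)]
    simp [pvG]

-- ----- A-side lemmas -----

theorem pvStepA_skip (d : PySem.Dict String (List (String × String)))
    (x : List (String × String)) (h : pvEmailS x = "") : pvStepA d x = d := by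
  simp [pvStepA, h]

-- folding a whole truthy-email group into the singleton dict {email: b}
theorem pvFoldA_grp (es : String) (hes : es ≠ "") (g : List (List (String × String)))
    (hg : ∀ x ∈ g, pvEmailS x = es) :
    ∀ b, g.foldl pvStepA (PySem.Dict.mk [(es, b)]) = PySem.Dict.mk [(es, pvBest b g)] := by
  induction g with
  | nil => intro b; rfl
  | cons x xs ih =>
    intro b
    have hx : pvEmailS x = es := hg x (by simp)
    have hstep : pvStepA (PySem.Dict.mk [(es, b)]) x
        = PySem.Dict.mk [(es, if pvTsS b < pvTsS x then x else b)] := by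
      by_cases hlt : pvTsS b < pvTsS x
      · simp [pvStepA, hx, hes, PySem.Dict.contains, PySem.Dict.getD, PySem.Dict.get?,
          PySem.Dict.insert, hlt]
      · simp [pvStepA, hx, hes, PySem.Dict.contains, PySem.Dict.getD, PySem.Dict.get?,
          PySem.Dict.insert, hlt]
    simp only [List.foldl_cons, hstep]
    rw [ih (fun y hy => hg y (by simp [hy]))]
    rfl

theorem pvStepA_empty (c : List (String × String)) (es : String) (hes : es ≠ "")
    (hc : pvEmailS c = es) : pvStepA PySem.Dict.empty c = PySem.Dict.mk [(es, c)] := by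
  simp [pvStepA, hc, hes, PySem.Dict.empty, PySem.Dict.contains, PySem.Dict.insert]

-- folding over connections none of whose emails occurs in the prefix `pre` leaves `pre` intact
theorem pvFoldA_pre (l : List (List (String × String))) (pre : List (String × List (String × String)))
    (hpre : ∀ x ∈ l, ∀ p ∈ pre, p.1 ≠ pvEmailS x) :
    ∀ (d : PySem.Dict String (List (String × String))),
    l.foldl pvStepA (PySem.Dict.mk (pre ++ d.items)) = PySem.Dict.mk (pre ++ (l.foldl pvStepA d).items) := by
  induction l with
  | nil => intro d; rfl
  | cons x xs ih =>
    intro d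
    have hx : ∀ p ∈ pre, p.1 ≠ pvEmailS x := fun p hp => hpre x (by simp) p hp
    have hstep : pvStepA (PySem.Dict.mk (pre ++ d.items)) x = PySem.Dict.mk (pre ++ (pvStepA d x).items) := by
      by_cases he : pvEmailS x = ""
      · simp [pvStepA, he]
      · have hany : pre.any (fun p => p.1 == pvEmailS x) = false := by
          simp only [List.any_eq_false]
          intro p hp
          simpa using hx p hp
        have hfind : pre.find? (fun p => p.1 == pvEmailS x) = none := by
          simp only [List.find?_eq_none]
          intro p hp
          simpa using hx p hp
        have hcont : (PySem.Dict.mk (pre ++ d.items)).contains (pvEmailS x) = d.contains (pvEmailS x) := by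
          simp [PySem.Dict.contains, List.any_append, hany]
        have hget : (PySem.Dict.mk (pre ++ d.items)).getD (pvEmailS x) [] = d.getD (pvEmailS x) [] := by
          simp [PySem.Dict.getD, PySem.Dict.get?, List.find?_append, hfind]
        have hins : (PySem.Dict.mk (pre ++ d.items)).insert (pvEmailS x) x
            = PySem.Dict.mk (pre ++ (d.insert (pvEmailS x) x).items) := by
          have hmap : pre.map (fun p => if (p.1 == pvEmailS x) = true then (pvEmailS x, x) else p) = pre := by
            conv_rhs => rw [← List.map_id pre]
            apply List.map_congr_left
            intro p hp
            have : (p.1 == pvEmailS x) = false := by simpa using hx p hp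
            simp [this]
          by_cases hcd : d.contains (pvEmailS x) = true
          · have hc2 : (PySem.Dict.mk (pre ++ d.items)).contains (pvEmailS x) = true := by
              rw [hcont]; exact hcd
            simp only [PySem.Dict.insert, hc2, hcd, if_true, List.map_append, hmap]
          · have hc2 : (PySem.Dict.mk (pre ++ d.items)).contains (pvEmailS x) = true ↔ False := by
              rw [hcont]; simp [hcd]
            simp only [PySem.Dict.insert, hcd, hc2, if_false, List.append_assoc, iff_false] at *
            simp [hcont, hcd]
        simp only [pvStepA, he, ne_eq, not_false_iff, if_true, hcont, hget, hins]
        split <;> rfl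
    simp only [List.foldl_cons, hstep]
    exact ih (fun y hy p hp => hpre y (by simp [hy]) p hp) (pvStepA d x)

-- if a truthy email value es equals pvEmailS x then x's 'email' lookup is literally some es
theorem pvEmail_of_emailS (x : List (String × String)) (es : String) (hes : es ≠ "")
    (h : pvEmailS x = es) : pvEmail x = some es := by
  unfold pvEmailS at h
  unfold pvEmail
  cases hl : List.lookup "email" x with
  | none => rw [hl] at h; exact absurd h.symm hes
  | some v => rw [hl] at h; exact congrArg some h

-- main lemma: on a list sorted (Pairwise ≤) by email, A's dict fold produces exactly pvG
theorem pvA_eq_G : ∀ (n : Nat) (s : List (List (String × String))), s.length ≤ n →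
    s.Pairwise (fun a b => pvEmailS a ≤ pvEmailS b) →
    (s.foldl pvStepA PySem.Dict.empty).values = pvG s := by
  intro n
  induction n with
  | zero =>
    intro s hl _
    have : s = [] := List.eq_nil_of_length_eq_zero (Nat.le_zero.mp hl)
    simp [this, pvG, PySem.Dict.empty, PySem.Dict.values]
  | succ n ih =>
    intro s hl hs
    cases s with
    | nil => simp [pvG, PySem.Dict.empty, PySem.Dict.values]
    | cons c rest =>
      have hpc : ∀ x ∈ rest, pvEmailS c ≤ pvEmailS x := by
        intro x hx; exact (List.pairwise_cons.mp hs).1 x hx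
      have hpr : rest.Pairwise (fun a b => pvEmailS a ≤ pvEmailS b) := (List.pairwise_cons.mp hs).2
      have hGtop : pvG (c :: rest) = pvGk (pvEmail c) [c] rest := rfl
      set run := rest.takeWhile (fun x => pvEmail x == pvEmail c) with hrun
      set rest' := rest.dropWhile (fun x => pvEmail x == pvEmail c) with hrest'
      have hsplit : run ++ rest' = rest := List.takeWhile_append_dropWhile
      have hrunmem : ∀ x ∈ run, pvEmail x = pvEmail c := by
        intro x hx
        have := List.mem_takeWhile_imp (hrun ▸ hx)
        simpa using this
      have hrest'sub : rest'.Sublist rest := hrest' ▸ List.dropWhile_sublist _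
      have hrest'pw : rest'.Pairwise (fun a b => pvEmailS a ≤ pvEmailS b) := hpr.sublist hrest'sub
      have hrest'len : rest'.length ≤ n := by
        have h1 : rest'.length ≤ rest.length := hrest'sub.length_le
        have h2 : rest.length ≤ n := by simpa using Nat.le_of_succ_le_succ hl
        omega
      have hIH := ih rest' hrest'len hrest'pw
      have hGk := pvGk_eq rest (pvEmail c) [c]
      rw [hGtop, hGk, ← hrun, ← hrest']
      by_cases htr : pvTruthy (pvEmail c) = true
      · -- truthy head: group [c]++run, singleton dict, disjoint tail
        obtain ⟨es, hse, hes⟩ : ∃ es, pvEmail c = some es ∧ es ≠ "" := by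
          unfold pvTruthy at htr
          cases h : pvEmail c with
          | none => rw [h] at htr; simp at htr
          | some s => rw [h] at htr; simp at htr; exact ⟨s, rfl, htr⟩
        have hcs : pvEmailS c = es := by simp [pvEmailS, pvEmail] at hse ⊢; simp [hse]
        have hruns : ∀ x ∈ run, pvEmailS x = es := by
          intro x hx
          have := hrunmem x hx
          rw [hse] at this
          simp [pvEmailS, pvEmail] at this ⊢
          simp [this]
        -- every element of rest' has email ≠ es
        have hrest'ne : ∀ x ∈ rest', pvEmailS x ≠ es := by
          intro x hx
          cases hr : rest' with
          | nil => rw [hr] at hx; simp at hx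
          | cons h t =>
            have hhead : (pvEmail h == pvEmail c) = false := by
              have h5 := List.head?_dropWhile_not (fun x => pvEmail x == pvEmail c) rest
              rw [← hrest', hr] at h5
              simpa using h5
            have hheadne : pvEmail h ≠ pvEmail c := by simpa using hhead
            have hheadmem : h ∈ rest := hrest'sub.subset (hr ▸ (by simp))
            have hle : es ≤ pvEmailS h := hcs ▸ hpc h hheadmem
            have hhne : pvEmailS h ≠ es := by
              intro heq
              exact hheadne ((pvEmail_of_emailS h es hes heq).trans hse.symm)
            have hlt : es < pvEmailS h := lt_of_le_of_ne hle (fun e => hhne e.symm)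
            rw [hr] at hx
            rcases List.mem_cons.mp hx with rfl | hxt
            · exact fun e => hhne e
            · have hpw' : pvEmailS h ≤ pvEmailS x := by
                have := hr ▸ hrest'pw
                exact (List.pairwise_cons.mp this).1 x hxt
              intro heq
              rw [heq] at hpw'
              exact absurd (lt_of_lt_of_le hlt hpw') (lt_irrefl es)
        -- fold the group
        have hfold1 : ([c] ++ run ++ rest').foldl pvStepA PySem.Dict.empty
            = rest'.foldl pvStepA (PySem.Dict.mk [(es, pvBest c run)]) := by
          rw [List.foldl_append, List.foldl_append]
          congr 1
          simp only [List.foldl_cons, List.foldl_nil]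
          rw [pvStepA_empty c es hes hcs]
          exact pvFoldA_grp es hes run hruns c
        have hpre : ∀ x ∈ rest', ∀ p ∈ [(es, pvBest c run)], p.1 ≠ pvEmailS x := by
          intro x hx p hp
          have hpe : p = (es, pvBest c run) := by simpa using hp
          rw [hpe]
          exact fun e => hrest'ne x hx e.symm
        have hfold2 : rest'.foldl pvStepA (PySem.Dict.mk [(es, pvBest c run)])
            = PySem.Dict.mk ((es, pvBest c run) :: (rest'.foldl pvStepA PySem.Dict.empty).items) := by
          have := pvFoldA_pre rest' [(es, pvBest c run)] hpre PySem.Dict.empty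
          simpa [PySem.Dict.empty] using this
        have hlist : c :: rest = [c] ++ run ++ rest' := by
          simp [List.append_assoc, hsplit]
        rw [hlist, hfold1, hfold2]
        have hemit : pvEmit (pvEmail c) ([c] ++ run) = [pvBest c run] := by
          simp [pvEmit, htr, pvMax?_cons run c]
        rw [hemit]
        simp only [PySem.Dict.values, List.map_cons]
        rw [← PySem.Dict.values]
        rw [hIH]
        rfl
      · -- falsy head: c and its run are all skipped, emit nothing
        have hfalsy : ∀ x, pvEmail x = pvEmail c → pvEmailS x = "" := by
          intro x hx
          unfold pvTruthy at htr
          unfold pvEmailS pvEmail at *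
          cases h : List.lookup "email" c with
          | none => rw [h] at hx; rw [hx]; rfl
          | some s =>
            rw [h] at htr
            simp at htr
            rw [h] at hx
            rw [hx]
            simp [htr]
        have hskip : ∀ (g : List (List (String × String))), (∀ x ∈ g, pvEmailS x = "") →
            ∀ d, g.foldl pvStepA d = d := by
          intro g
          induction g with
          | nil => intro _ d; rfl
          | cons y ys ihg =>
            intro hg d
            simp only [List.foldl_cons]
            rw [pvStepA_skip d y (hg y (by simp))]
            exact ihg (fun z hz => hg z (by simp [hz])) d
        have hlist : c :: rest = [c] ++ run ++ rest' := by
          simp [List.append_assoc, hsplit]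
        rw [hlist, List.foldl_append, List.foldl_append]
        rw [hskip [c] (by intro x hx; simp at hx; rw [hx]; exact hfalsy c rfl) _]
        rw [hskip run (fun x hx => hfalsy x (hrunmem x hx)) _]
        have hemit : pvEmit (pvEmail c) ([c] ++ run) = [] := by
          simp [pvEmit, htr]
        rw [hemit, hIH]
        simp

-- ===== VERDICT (by name: the statement is the Claim_ definition above) =====
theorem remove_duplicates_by_email_spec : Claim_equal_remove_duplicates_by_email := by
  intro connections _ _
  unfold Spec_remove_duplicates_by_email remove_duplicates_by_email remove_duplicates_by_email_alt
  have hpw : (PySem.List.sorted connections pvEmailS false).Pairwise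
      (fun a b => pvEmailS a ≤ pvEmailS b) := PySem.List.sorted_pairwise connections pvEmailS
  rw [pvA_eq_G (PySem.List.sorted connections pvEmailS false).length _ (le_refl _) hpw]
  rw [← pvB_eq_G]
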